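-- pv_equiv track=rewrite | github.com/ayming-france/sinistralite-france | data/pipeline/parse_pdf.py | parse_table_row_numbers
-- ===== SOURCE A (Python) =====
-- def parse_table_row_numbers(digit_groups: list[str], max_values: list[int]) -> list[int]:
--     """Parse des groupes de chiffres en valeurs de colonnes selon les règles françaises.
--
--     Utilise max_values par colonne pour distinguer séparateurs de milliers et sauts de colonnes.
--     Un groupe de 3 chiffres est traité comme continuation de milliers seulement si le résultat
--     combiné reste dans la plage maximale de la colonne courante.
--     """
--     values = []
--     current = -1  # -1 = pas de valeur commencée
--
--     for group in digit_groups: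
--         n = int(group)
--         if current > 0 and len(group) == 3:
--             candidate = current * 1000 + n
--             col_idx = len(values)
--             if col_idx < len(max_values) and candidate <= max_values[col_idx]:
--                 current = candidate
--                 continue
--         # Nouvelle valeur
--         if current >= 0:
--             values.append(current)
--         current = n
--
--     if current >= 0:
--         values.append(current)
--     return values
-- ===== SOURCE B (Python) =====
-- def parse_table_row_numbers(digit_groups: list[str], max_values: list[int]) -> list[int]:
--     """Same parsing, but without the `current` accumulator / -1 sentinel:
--     the in-progress value always lives at values[-1]."""
--     values = []
--     for group in digit_groups:
--         n = int(group)
--         if values and len(group) == 3 and values[-1] > 0: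
--             candidate = values[-1] * 1000 + n
--             col_idx = len(values) - 1
--             if col_idx < len(max_values) and candidate <= max_values[col_idx]:
--                 values[-1] = candidate
--                 continue
--         values.append(n)
--     return values
-- ===== Notes on version B (the rewrite author's own statement) =====
-- stated objective: simpler
-- what changed: B drops A's separate `current` accumulator, -1 sentinel and post-loop flush: the result list is built directly, with the in-progress value kept as values[-1] and merged in place.
-- outside the precondition, e.g. on parse_table_row_numbers(['12', '-5'], [100000]): A returns [12], B returns [12, -5]; on parse_table_row_numbers(['x'], []): A raises ValueError, B raises ValueError
import Mathlib
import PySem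

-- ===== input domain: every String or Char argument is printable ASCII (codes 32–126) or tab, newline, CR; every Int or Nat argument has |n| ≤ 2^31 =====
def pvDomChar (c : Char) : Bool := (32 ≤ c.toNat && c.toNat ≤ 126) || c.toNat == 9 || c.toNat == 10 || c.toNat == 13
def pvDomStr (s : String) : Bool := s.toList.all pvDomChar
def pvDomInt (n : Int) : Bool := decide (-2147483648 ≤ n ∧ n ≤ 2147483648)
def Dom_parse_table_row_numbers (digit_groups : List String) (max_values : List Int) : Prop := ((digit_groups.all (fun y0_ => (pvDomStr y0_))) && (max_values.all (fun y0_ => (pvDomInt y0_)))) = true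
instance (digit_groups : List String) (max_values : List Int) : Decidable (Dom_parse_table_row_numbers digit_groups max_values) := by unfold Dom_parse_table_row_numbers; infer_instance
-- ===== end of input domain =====

-- B builds the result list directly (in-progress value = values[-1]) instead of A's
-- separate `current` accumulator with a -1 sentinel and a post-loop flush; objective: simpler.


-- ===== PORT A =====
-- loop body of A; `int(group)` is PySem.Int.ofStr?; inside Pre_ it is always `some`, the
-- `.getD 0` only totalises (Python raises ValueError there, excluded by Pre_).
def pvStepA (max_values : List Int) (st : List Int × Int) (group : String) : List Int × Int :=
  let values := st.1
  let current := st.2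
  let n := (PySem.Int.ofStr? group).getD 0
  let newVal : List Int × Int :=
    ((if current ≥ 0 then values ++ [current] else values), n)
  if current > 0 ∧ PySem.Str.len group = 3 then
    let candidate := current * 1000 + n
    let col_idx : Int := values.length
    if col_idx < (max_values.length : Int) ∧
        candidate ≤ (PySem.List.pyGet? max_values col_idx).getD 0 then
      (values, candidate)
    else newVal
  else newVal

def parse_table_row_numbers (digit_groups : List String) (max_values : List Int) : List Int :=
  let st := digit_groups.foldl (pvStepA max_values) ([], -1)
  if st.2 ≥ 0 then st.1 ++ [st.2] else st.1

-- ===== PORT B =====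
-- loop body of B: no sentinel, the in-progress value is values[-1].
def pvStepB (max_values : List Int) (values : List Int) (group : String) : List Int :=
  let n := (PySem.Int.ofStr? group).getD 0
  if values ≠ [] ∧ PySem.Str.len group = 3 ∧ (PySem.List.pyGet? values (-1)).getD 0 > 0 then
    let candidate := (PySem.List.pyGet? values (-1)).getD 0 * 1000 + n
    let col_idx : Int := (values.length : Int) - 1
    if col_idx < (max_values.length : Int) ∧
        candidate ≤ (PySem.List.pyGet? max_values col_idx).getD 0 then
      values.dropLast ++ [candidate]   -- values[-1] = candidate
    else values ++ [n]
  else values ++ [n]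

def parse_table_row_numbers_alt (digit_groups : List String) (max_values : List Int) : List Int :=
  digit_groups.foldl (pvStepB max_values) []

-- ===== PRECONDITION & SPEC =====
-- Pre_ excludes inputs where int(group) raises ValueError (A returns nothing there), and
-- groups parsing to a NEGATIVE int, on which A's -1 sentinel silently drops values — outside
-- the function's natural domain of digit groups, where both behaviours are accidents.
def Pre_parse_table_row_numbers (digit_groups : List String) (max_values : List Int) : Prop :=
  ∀ g ∈ digit_groups, 0 ≤ (PySem.Int.ofStr? g).getD (-1)
instance (digit_groups : List String) (max_values : List Int) : Decidable (Pre_parse_table_row_numbers digit_groups max_values) := by unfold Pre_parse_table_row_numbers; infer_instance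

def pvWitness_parse_table_row_numbers : List String × List Int := (["1", "234", "56"], [999999, 100])

def Spec_parse_table_row_numbers (digit_groups : List String) (max_values : List Int) (out : List Int) : Prop := out = parse_table_row_numbers_alt digit_groups max_values
instance (digit_groups : List String) (max_values : List Int) (out : List Int) : Decidable (Spec_parse_table_row_numbers digit_groups max_values out) := by unfold Spec_parse_table_row_numbers; infer_instance

-- ===== CLAIM (what is proved, stated in full; the proofs are below) =====
def Claim_equal_parse_table_row_numbers : Prop := ∀ (digit_groups : List String) (max_values : List Int), Dom_parse_table_row_numbers digit_groups max_values → Pre_parse_table_row_numbers digit_groups max_values → Spec_parse_table_row_numbers digit_groups max_values (parse_table_row_numbers digit_groups max_values)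

-- ===== LEMMAS AND PROOFS =====

-- the simulation relation between A's (values, current) state and B's list
def pvRel (st : List Int × Int) (vs : List Int) : Prop :=
  (st = ([], -1) ∧ vs = []) ∨ (0 ≤ st.2 ∧ vs = st.1 ++ [st.2])

theorem pvStep_sim (max_values : List Int) (st : List Int × Int) (vs : List Int)
    (g : String) (hg : 0 ≤ (PySem.Int.ofStr? g).getD (-1)) (h : pvRel st vs) :
    pvRel (pvStepA max_values st g) (pvStepB max_values vs g) := by
  have hn : 0 ≤ (PySem.Int.ofStr? g).getD 0 := by
    cases hget : PySem.Int.ofStr? g with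
    | none => simp [hget] at hg
    | some n => simpa [hget] using (by simpa [hget] using hg)
  rcases h with ⟨hst, hvs⟩ | ⟨hc, hvs⟩
  · subst hvs
    rw [hst]
    simp only [pvStepA, pvStepB]
    norm_num
    right
    exact ⟨hn, rfl⟩
  · obtain ⟨values, current⟩ := st
    simp only at hc hvs
    subst hvs
    have hlast : (PySem.List.pyGet? (values ++ [current]) (-1)).getD 0 = current := by
      rw [PySem.List.pyGet?_neg_one_append_singleton]
      rfl
    simp only [pvStepA, pvStepB, hlast]
    by_cases h1 : current > 0 ∧ PySem.Str.len g = 3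
    · have hne : values ++ [current] ≠ [] := by simp
      have hB1 : (values ++ [current] ≠ [] ∧ PySem.Str.len g = 3 ∧ current > 0) := ⟨hne, h1.2, h1.1⟩
      rw [if_pos h1, if_pos hB1]
      have hcol : ((values ++ [current]).length : Int) - 1 = (values.length : Int) := by
        simp
      rw [hcol]
      by_cases h2 : (values.length : Int) < (max_values.length : Int) ∧
          current * 1000 + (PySem.Int.ofStr? g).getD 0 ≤ (PySem.List.pyGet? max_values (values.length : Int)).getD 0
      · rw [if_pos h2, if_pos h2]
        right
        constructor
        · simp only
          have : (0:Int) ≤ current * 1000 := by positivity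
          omega
        · simp
      · rw [if_neg h2, if_neg h2]
        right
        refine ⟨hn, ?_⟩
        simp [hc]
    · have hB1 : ¬ (values ++ [current] ≠ [] ∧ PySem.Str.len g = 3 ∧ current > 0) := by
        intro ⟨_, hl, hcpos⟩; exact h1 ⟨hcpos, hl⟩
      rw [if_neg h1, if_neg hB1]
      right
      refine ⟨hn, ?_⟩
      simp [hc]

theorem pvFold_sim (max_values : List Int) (digit_groups : List String)
    (hpre : ∀ g ∈ digit_groups, 0 ≤ (PySem.Int.ofStr? g).getD (-1)) :
    ∀ (st : List Int × Int) (vs : List Int), pvRel st vs →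
      pvRel (digit_groups.foldl (pvStepA max_values) st)
            (digit_groups.foldl (pvStepB max_values) vs) := by
  induction digit_groups with
  | nil => intro st vs h; simpa using h
  | cons g gs ih =>
    intro st vs h
    simp only [List.foldl_cons]
    exact ih (fun x hx => hpre x (List.mem_cons_of_mem _ hx)) _ _
      (pvStep_sim max_values st vs g (hpre g (List.mem_cons_self ..)) h)

-- ===== VERDICT (by name: the statement is the Claim_ definition above) =====
theorem parse_table_row_numbers_spec : Claim_equal_parse_table_row_numbers := by
  intro digit_groups max_values _ hpre
  unfold Spec_parse_table_row_numbers parse_table_row_numbers parse_table_row_numbers_alt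
  have h := pvFold_sim max_values digit_groups hpre ([], -1) [] (Or.inl ⟨rfl, rfl⟩)
  rcases h with ⟨hst, hvs⟩ | ⟨hc, hvs⟩
  · rw [hst, hvs]; norm_num
  · simp only [hvs]
    rw [if_pos hc]
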